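-- pv_equiv track=rewrite | github.com/MrBrantCode/unitest_baseline | mut_generate/mist_train_taco/taco_3027/solution.py | count_chocolate_poles
-- ===== SOURCE A (Python) =====
-- def count_chocolate_poles(l: int, k: int) -> int:
--     ans = 0
--     for total_thickness in range(1, l + 1):
--         for i in range(1000):
--             if i * k > total_thickness:
--                 break
--             j = total_thickness - i * k + i
--             if j % 2:
--                 j //= 2
--                 j += 1
--                 s = 1
--                 for a in range(i):
--                     s *= j - a
--                     s //= a + 1
--                 ans += s
--     return ans
-- ===== SOURCE B (Python) =====
-- def count_chocolate_poles(l: int, k: int) -> int: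
--     # For each disk-count-ish i, sum the binomials over admissible thicknesses
--     # in closed form via the hockey-stick identity, removing the loop over t.
--     def comb(n, r):
--         if r < 0 or n < r:
--             return 0
--         s = 1
--         for a in range(r):
--             s = s * (n - a) // (a + 1)
--         return s
--
--     ans = 0
--     for i in range(1000):
--         c = i * k
--         lo = c if c > 1 else 1
--         if lo > l:
--             continue
--         p = (c + i + 1) % 2          # required parity of t so that t - c + i is odd
--         t0 = lo if lo % 2 == p else lo + 1
--         if t0 > l:
--             continue
--         t1 = l if l % 2 == p else l - 1
--         m0 = (t0 - c + i + 1) // 2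
--         m1 = (t1 - c + i + 1) // 2
--         ans += comb(m1 + 1, i + 1) - comb(m0, i + 1)
--     return ans
-- ===== Notes on version B (the rewrite author's own statement) =====
-- stated objective: faster
-- what changed: B eliminates A's loop over thicknesses entirely: for each piece count i it sums the binomial coefficients over all admissible thicknesses in closed form with the hockey-stick identity, computing just two binomials per i.
import Mathlib
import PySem

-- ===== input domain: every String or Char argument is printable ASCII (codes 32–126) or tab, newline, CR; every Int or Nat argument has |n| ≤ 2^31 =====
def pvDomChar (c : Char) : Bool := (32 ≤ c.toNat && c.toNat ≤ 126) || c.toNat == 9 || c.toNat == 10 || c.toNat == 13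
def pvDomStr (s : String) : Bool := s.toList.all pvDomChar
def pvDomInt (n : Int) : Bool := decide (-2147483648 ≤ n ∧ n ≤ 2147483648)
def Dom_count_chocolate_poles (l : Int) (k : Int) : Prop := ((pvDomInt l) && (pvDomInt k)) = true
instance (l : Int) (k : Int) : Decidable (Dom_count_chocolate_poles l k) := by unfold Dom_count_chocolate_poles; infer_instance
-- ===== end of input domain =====

-- B replaces A's loop over thicknesses by a closed-form (hockey-stick) sum of binomials per
-- piece count i — measurably faster; the proof shows both equal the same sum of binomials.

-- ===== PORT A =====
-- s = 1; for a in range(i): s *= j - a; s //= a + 1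
def pvProdA (j : Int) (i : Nat) : Int :=
  (List.range i).foldl (fun (s : Int) (a : Nat) => PySem.Int.floordiv (s * (j - (a : Int))) ((a : Int) + 1)) 1

-- the inner 'for i in range(1000): if i*k > total_thickness: break; …' loop; fuel = iterations left
def pvInnerA (k t : Int) : Nat → Nat → Int → Int
  | _, 0, ans => ans
  | i, fuel+1, ans =>
    if (i : Int) * k > t then ans
    else
      pvInnerA k t (i+1) fuel
        (if PySem.Int.mod (t - (i : Int) * k + (i : Int)) 2 ≠ 0 then
           ans + pvProdA (PySem.Int.floordiv (t - (i : Int) * k + (i : Int)) 2 + 1) i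
         else ans)

def count_chocolate_poles (l : Int) (k : Int) : Int :=
  (PySem.List.pyRange 1 (l+1)).foldl (fun ans t => pvInnerA k t 0 1000 ans) 0

-- ===== PORT B =====
-- comb(n, r): 0 if r < 0 or n < r, else the exact falling-factorial product
def pvCombB (n : Int) (r : Int) : Int :=
  if r < 0 ∨ n < r then 0
  else (List.range r.toNat).foldl (fun (s : Int) (a : Nat) => PySem.Int.floordiv (s * (n - (a : Int))) ((a : Int) + 1)) 1

-- B's loop body for one value of i (Python's 'continue' branches return 0)
def pvTermB (l k : Int) (i : Int) : Int :=
  let c := i * k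
  let lo := if c > 1 then c else 1
  if lo > l then 0
  else
    let p := PySem.Int.mod (c + i + 1) 2
    let t0 := if PySem.Int.mod lo 2 = p then lo else lo + 1
    if t0 > l then 0
    else
      let t1 := if PySem.Int.mod l 2 = p then l else l - 1
      let m0 := PySem.Int.floordiv (t0 - c + i + 1) 2
      let m1 := PySem.Int.floordiv (t1 - c + i + 1) 2
      pvCombB (m1 + 1) (i + 1) - pvCombB m0 (i + 1)

def count_chocolate_poles_alt (l : Int) (k : Int) : Int :=
  (PySem.List.pyRange 0 1000).foldl (fun ans i => ans + pvTermB l k i) 0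

-- ===== PRECONDITION & SPEC =====
def Spec_count_chocolate_poles (l : Int) (k : Int) (out : Int) : Prop := out = count_chocolate_poles_alt l k
instance (l : Int) (k : Int) (out : Int) : Decidable (Spec_count_chocolate_poles l k out) := by unfold Spec_count_chocolate_poles; infer_instance

-- ===== CLAIM (what is proved, stated in full; the proofs are below) =====
def Claim_equal_count_chocolate_poles : Prop := ∀ (l : Int) (k : Int), Dom_count_chocolate_poles l k → Spec_count_chocolate_poles l k (count_chocolate_poles l k)

-- ===== LEMMAS AND PROOFS =====

-- A's per-(total_thickness, i) contribution, written as a total function of i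
def pvG (k t : Int) (i : Nat) : Int :=
  if (i : Int) * k ≤ t then
    (if PySem.Int.mod (t - (i : Int) * k + (i : Int)) 2 ≠ 0 then
       pvProdA (PySem.Int.floordiv (t - (i : Int) * k + (i : Int)) 2 + 1) i
     else 0)
  else 0

def pvGsum (k t : Int) : Int := ((List.range 1000).map (pvG k t)).sum

-- the exact falling-factorial fold computes the binomial coefficient
lemma pvBinFold_choose (n r : Nat) :
    (List.range r).foldl (fun (s : Int) (a : Nat) => PySem.Int.floordiv (s * ((n : Int) - (a : Int))) ((a : Int) + 1)) 1
      = (n.choose r : Int) := by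
  induction r with
  | zero => simp
  | succ r ih =>
    rw [List.range_succ, List.foldl_append, ih]
    show PySem.Int.floordiv ((n.choose r : Int) * ((n:Int) - (r:Int))) ((r:Int)+1) = _
    have key : (n.choose r : Int) * ((n:Int) - (r:Int)) = (n.choose (r+1) : Int) * ((r:Int)+1) := by
      rcases lt_or_ge r n with h | h
      · have h2 := Nat.choose_succ_right_eq n r
        rw [show ((n:Int) - (r:Int)) = ((n - r : Nat) : Int) from by rw [Nat.cast_sub h.le]]
        exact_mod_cast h2.symm
      · rcases eq_or_lt_of_le h with h1 | h1
        · simp [← h1]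
        · simp [Nat.choose_eq_zero_of_lt h1, Nat.choose_eq_zero_of_lt (by omega : n < r+1)]
    rw [key, PySem.Int.floordiv_eq_ediv_of_pos (by omega)]
    exact Int.mul_ediv_cancel _ (by omega)

lemma pvProdA_choose (j : Int) (hj : 0 ≤ j) (i : Nat) : pvProdA j i = (j.toNat.choose i : Int) := by
  rw [pvProdA, show j = (j.toNat : Int) from (Int.toNat_of_nonneg hj).symm]
  exact pvBinFold_choose j.toNat i

lemma pvCombB_choose (n r : Int) (hn : 0 ≤ n) (hr : 0 ≤ r) :
    pvCombB n r = (n.toNat.choose r.toNat : Int) := by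
  rw [pvCombB]
  by_cases h : n < r
  · rw [if_pos (Or.inr h)]
    exact_mod_cast (Nat.choose_eq_zero_of_lt (by omega)).symm
  · rw [if_neg (by omega)]
    conv_lhs => rw [show n = (n.toNat : Int) from (Int.toNat_of_nonneg hn).symm]
    exact pvBinFold_choose n.toNat r.toNat

-- Pascal's rule, in the shape the step lemma needs
lemma pvPascal (M : Int) (hM : 0 ≤ M) (r : Nat) :
    pvCombB (M + 1) ((r : Int) + 1) = pvCombB M ((r : Int) + 1) + pvProdA M r := by
  rw [pvCombB_choose _ _ (by omega) (by omega), pvCombB_choose _ _ hM (by omega), pvProdA_choose M hM r]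
  rw [show (M+1).toNat = M.toNat + 1 from by omega,
      show (((r:Int))+1).toNat = r + 1 from by omega]
  rw [Nat.choose_succ_succ]
  push_cast; ring

-- once i*k > t (with t ≥ 1, forcing k ≥ 1), every later i also has i*k > t: the break loses nothing
lemma pvG_zero_of_gt (k t : Int) (ht : 1 ≤ t) (i d : Nat) (h : (i : Int) * k > t) :
    pvG k t (i + d) = 0 := by
  have hk : 1 ≤ k := by
    by_contra hk
    have h0 : (0:Int) ≤ (i : Int) := Int.natCast_nonneg i
    have hk0 : k ≤ 0 := by omega
    nlinarith
  have : ((i + d : Nat) : Int) * k > t := by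
    push_cast
    nlinarith [Int.natCast_nonneg d]
  rw [pvG, if_neg (by omega)]

-- A's inner loop with break equals the total per-i sum
lemma pvInnerA_eq_sum (k t : Int) (ht : 1 ≤ t) :
    ∀ (fuel i : Nat) (ans : Int),
      pvInnerA k t i fuel ans = ans + ((List.range fuel).map (fun d => pvG k t (i + d))).sum := by
  intro fuel
  induction fuel with
  | zero => intro i ans; simp [pvInnerA]
  | succ fuel ih =>
    intro i ans
    rw [pvInnerA]
    by_cases h : (i : Int) * k > t
    · rw [if_pos h]
      have hz : ∀ d ∈ List.range (fuel+1), pvG k t (i + d) = 0 := fun d _ => pvG_zero_of_gt k t ht i d h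
      rw [List.map_congr_left (by intro d hd; exact hz d hd)]
      simp
    · rw [if_neg h, ih]
      rw [List.range_succ_eq_map]
      simp only [List.map_cons, List.map_map, List.sum_cons]
      have hG : pvG k t i = (if PySem.Int.mod (t - (i : Int) * k + (i : Int)) 2 ≠ 0 then
           pvProdA (PySem.Int.floordiv (t - (i : Int) * k + (i : Int)) 2 + 1) i
         else 0) := by rw [pvG, if_pos (by omega)]
      have hfun : ((List.range fuel).map (fun d => pvG k t (i + 1 + d))) = ((List.range fuel).map ((fun d => pvG k t (i + d)) ∘ Nat.succ)) := by
        apply List.map_congr_left; intro d _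
        simp only [Function.comp]
        congr 1; omega
      rw [hfun]
      have hG0 : pvG k t (i + 0) = pvG k t i := by norm_num
      rw [hG0, hG]
      split_ifs with hmod <;> ring

-- A as a sum over thicknesses of per-thickness sums
lemma pvA_eq_sum (l k : Int) :
    count_chocolate_poles l k = ((PySem.List.pyRange 1 (l+1)).map (fun t => pvGsum k t)).sum := by
  rw [count_chocolate_poles]
  rw [PySem.List.foldl_congr_mem _ _ (fun ans t => ans + pvGsum k t) 0 ?_]
  · rw [PySem.List.foldl_add]; ring
  · intro acc t htmem
    have ht : 1 ≤ t := (PySem.List.mem_pyRange_one.mp htmem).1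
    rw [pvInnerA_eq_sum k t ht 1000 0 acc]
    simp [pvGsum]

-- B as a sum over i
lemma pvB_eq_sum (l k : Int) :
    count_chocolate_poles_alt l k = ((List.range 1000).map (fun i : Nat => pvTermB l k (i : Int))).sum := by
  rw [count_chocolate_poles_alt, PySem.List.foldl_add, PySem.List.pyRange_one]
  simp [List.map_map, Function.comp_def]

lemma pvTermB_zero (l k : Int) (i : Int) (hl : l ≤ 0) : pvTermB l k i = 0 := by
  rw [pvTermB]
  split_ifs <;> first | rfl | (exfalso; omega)

-- crux: stepping l-1 → l changes B's i-th closed-form term by exactly A's (t = l, i) contribution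
lemma pvTermB_step (l k : Int) (i : Nat) (hl : 1 ≤ l) :
    pvTermB l k (i : Int) = pvTermB (l-1) k (i : Int) + pvG k l i := by
  have h2 : (0:Int) < 2 := by norm_num
  simp only [pvTermB, pvG, PySem.Int.mod_eq_emod_of_pos h2, PySem.Int.floordiv_eq_ediv_of_pos h2]
  have hI0 : (0:Int) ≤ (i : Int) := Int.natCast_nonneg i
  set I : Int := (i : Int) with hIdef
  set c : Int := I * k with hc
  set p : Int := (c + I + 1) % 2 with hp
  set lo : Int := if c > 1 then c else 1 with hlo
  have hloF : 1 ≤ lo ∧ c ≤ lo ∧ (lo = c ∨ lo = 1) := by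
    rw [hlo]; split_ifs <;> omega
  set t0 : Int := if lo % 2 = p then lo else lo + 1 with ht0
  have hpB : 0 ≤ p ∧ p < 2 := by rw [hp]; omega
  have ht0F : t0 % 2 = p ∧ lo ≤ t0 ∧ t0 ≤ lo + 1 := by
    rw [ht0]; split_ifs with h <;> omega
  by_cases hcl : c ≤ l
  · -- this i admits at least the bound c ≤ l; the l side's first guard is open
    have hlol : ¬ (lo > l) := by omega
    rw [if_neg hlol, if_pos hcl]
    by_cases hLp : l % 2 = p
    · -- t = l has the right parity: pvG contributes and the l side reaches the closed form
      have hodd : (l - c + I) % 2 ≠ 0 := by omega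
      have ht0l : ¬ (t0 > l) := by omega
      rw [if_neg ht0l, if_pos hLp, if_pos hodd]
      set M : Int := (l - c + I + 1) / 2 with hM
      have hM0 : 0 ≤ M := by omega
      rw [show (l - c + I) / 2 + 1 = M by omega]
      by_cases ht0eq : t0 = l
      · -- t = l is the only admissible thickness: the (l-1) side is empty
        rw [show (t0 - c + I + 1) / 2 = M by omega, pvPascal M hM0 i]
        by_cases hlo' : lo > l - 1
        · rw [if_pos hlo']; ring
        · rw [if_neg hlo', if_pos (show t0 > l - 1 by omega)]; ring
      · -- t0 < l: both sides are closed forms differing by Pascal's rule at M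
        rw [if_neg (show ¬ (lo > l - 1) by omega), if_neg (show ¬ (t0 > l - 1) by omega),
            if_neg (show ¬ ((l - 1) % 2 = p) by omega)]
        rw [show (l - 1 - 1 - c + I + 1) / 2 + 1 = M by omega]
        rw [pvPascal M hM0 i]
        ring
    · -- t = l has the wrong parity: nothing changes and pvG is 0
      rw [if_neg (show ¬ ((l - c + I) % 2 ≠ 0) by omega), if_neg hLp,
          if_pos (show (l - 1) % 2 = p by omega)]
      by_cases ht0l : t0 > l
      · rw [if_pos ht0l, if_pos (show t0 > l - 1 by omega)]
        by_cases hlo' : lo > l - 1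
        · rw [if_pos hlo']; ring
        · rw [if_neg hlo']; ring
      · rw [if_neg ht0l, if_neg (show ¬ (lo > l - 1) by omega),
            if_neg (show ¬ (t0 > l - 1) by omega)]
        ring
  · -- c > l: no admissible thickness for this i on either side, and pvG is 0
    have hglo : lo > l := by omega
    rw [if_pos hglo, if_pos (by omega : lo > l - 1), if_neg (by omega : ¬ (c ≤ l))]
    ring

lemma pvMain : ∀ (n : Nat) (l k : Int), l ≤ (n : Int) →
    count_chocolate_poles l k = count_chocolate_poles_alt l k := by
  intro n
  induction n with
  | zero =>
    intro l k hl
    rw [pvA_eq_sum, pvB_eq_sum, PySem.List.pyRange_one_eq_nil (by exact_mod_cast by omega : l + 1 ≤ 1)]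
    simp only [List.map_nil, List.sum_nil]
    symm
    apply List.sum_eq_zero
    intro x hx
    obtain ⟨j, _, rfl⟩ := List.mem_map.mp hx
    exact pvTermB_zero l k j (by exact_mod_cast hl)
  | succ n ih =>
    intro l k hl
    by_cases h : l ≤ (n : Int)
    · exact ih l k h
    · have hl1 : 1 ≤ l := by push_cast at hl ⊢; omega
      have hstep : ∀ i : Nat, pvTermB l k (i : Int) = pvTermB (l-1) k (i : Int) + pvG k l i :=
        fun i => pvTermB_step l k i hl1
      have hprev := ih (l-1) k (by push_cast at hl ⊢; omega)
      rw [pvA_eq_sum, pvB_eq_sum] at hprev ⊢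
      rw [PySem.List.pyRange_one_succ_right (by omega : (1:Int) ≤ l), List.map_append, List.sum_append]
      rw [show l - 1 + 1 = l by ring] at hprev
      rw [List.map_congr_left (fun i _ => hstep i), PySem.List.sum_map_add_int]
      rw [hprev]
      simp [pvGsum]

-- ===== VERDICT (by name: the statement is the Claim_ definition above) =====
theorem count_chocolate_poles_spec : Claim_equal_count_chocolate_poles := by
  intro l k _
  unfold Spec_count_chocolate_poles
  rcases (by omega : l ≤ 0 ∨ 0 < l) with h | h
  · exact pvMain 0 l k (by exact_mod_cast h)
  · exact pvMain l.toNat l k (by omega)
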